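-- pv_equiv track=rewrite | github.com/sd6701-droid/nlp-spring-2026 | HW-3/hw3code/part1/src/bpe.py | replace_bigram
-- ===== SOURCE A (Python) =====
-- from typing import TypeAlias
--
-- Bigram: TypeAlias = tuple[int, int]
--
-- def replace_bigram(token_ids: list[int], bigram: Bigram, bigram_id: int) -> list[int]:
--     """Replaces all copies of a bigram with `bigram_id`.
--
--     Args:
--         token_ids: List of token ids
--         bigram: The bigram to replace. A bigram is a tuple of exactly two token ids.
--         bigram_id: New id for the bigram
--
--     Returns:
--         list[int]: sequence with bigram replaced
--     """
--
--     idx = 0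
--     new_token_ids = []
--     while idx < len(token_ids):
--         if token_ids[idx : idx + 2] == list(bigram):
--             new_token_ids.append(bigram_id)
--             idx += 2
--         else:
--             new_token_ids.append(token_ids[idx])
--             idx += 1
--     return new_token_ids
-- ===== SOURCE B (Python) =====
-- def replace_bigram(token_ids, bigram, bigram_id):
--     """Replaces all copies of a bigram with `bigram_id` (look-back fold)."""
--     out = []
--     just_merged = False
--     for t in token_ids:
--         if out and not just_merged and out[-1] == bigram[0] and t == bigram[1]:
--             out[-1] = bigram_id
--             just_merged = True
--         else:
--             out.append(t)
--             just_merged = False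
--     return out
-- ===== Notes on version B (the rewrite author's own statement) =====
-- stated objective: faster
-- what changed: Replaced the index-based while loop that allocates and compares a two-element look-ahead slice at every step by a single forward fold that looks back at the last emitted token with a just_merged flag (preventing a freshly produced bigram_id from merging again).
import Mathlib
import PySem

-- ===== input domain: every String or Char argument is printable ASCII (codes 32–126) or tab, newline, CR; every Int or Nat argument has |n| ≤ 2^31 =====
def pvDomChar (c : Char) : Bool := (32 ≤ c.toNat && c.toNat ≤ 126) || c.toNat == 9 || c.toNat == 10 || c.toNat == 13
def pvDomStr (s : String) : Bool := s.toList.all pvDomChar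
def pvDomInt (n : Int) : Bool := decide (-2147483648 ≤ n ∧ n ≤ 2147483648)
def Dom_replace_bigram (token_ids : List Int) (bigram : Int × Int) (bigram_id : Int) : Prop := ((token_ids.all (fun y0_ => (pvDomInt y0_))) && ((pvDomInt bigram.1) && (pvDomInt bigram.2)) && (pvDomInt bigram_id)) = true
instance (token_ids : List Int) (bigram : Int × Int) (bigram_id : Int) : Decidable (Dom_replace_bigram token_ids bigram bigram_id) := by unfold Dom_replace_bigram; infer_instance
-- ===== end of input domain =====

-- B changes the decomposition: a single forward fold with look-back at the last emitted token
-- and a just_merged flag, instead of A's index-based while loop with two-element look-ahead slices.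

-- ===== PORT A =====
-- A's slice test token_ids[idx:idx+2] == list(bigram) succeeds exactly when two elements remain
-- and they equal the pair (a length-1 slice never equals the 2-element list), which is the
-- x :: y :: rest match below; the match/if structure mirrors the while loop step for step.
def replace_bigram (token_ids : List Int) (bigram : Int × Int) (bigram_id : Int) : List Int :=
  match token_ids with
  | x :: y :: rest =>
      if x = bigram.1 ∧ y = bigram.2 then
        bigram_id :: replace_bigram rest bigram bigram_id
      else
        x :: replace_bigram (y :: rest) bigram bigram_id
  | xs => xs

-- ===== PORT B =====
-- the fold keeps the output in reverse (Python's out[-1] is the head here) plus the just_merged flag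
def rbStep (a b id : Int) (acc : List Int × Bool) (t : Int) : List Int × Bool :=
  match acc with
  | (last :: restRev, jm) =>
      if jm = false ∧ last = a ∧ t = b then (id :: restRev, true)
      else (t :: last :: restRev, false)
  | ([], _) => ([t], false)

def replace_bigram_alt (token_ids : List Int) (bigram : Int × Int) (bigram_id : Int) : List Int :=
  ((List.foldl (rbStep bigram.1 bigram.2 bigram_id) ([], false) token_ids).1).reverse

-- ===== PRECONDITION & SPEC =====
def Spec_replace_bigram (token_ids : List Int) (bigram : Int × Int) (bigram_id : Int) (out : List Int) : Prop := out = replace_bigram_alt token_ids bigram bigram_id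
instance (token_ids : List Int) (bigram : Int × Int) (bigram_id : Int) (out : List Int) : Decidable (Spec_replace_bigram token_ids bigram bigram_id out) := by unfold Spec_replace_bigram; infer_instance

-- ===== CLAIM (what is proved, stated in full; the proofs are below) =====
def Claim_equal_replace_bigram : Prop := ∀ (token_ids : List Int) (bigram : Int × Int) (bigram_id : Int), Dom_replace_bigram token_ids bigram bigram_id → Spec_replace_bigram token_ids bigram bigram_id (replace_bigram token_ids bigram bigram_id)

-- ===== LEMMAS AND PROOFS =====

-- A on a list whose head cannot start a match just emits the head
lemma rbA_cons_ne (a b id x : Int) (rest : List Int) (hx : x ≠ a) :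
    replace_bigram (x :: rest) (a, b) id = x :: replace_bigram rest (a, b) id := by
  cases rest with
  | nil => simp [replace_bigram]
  | cons y r => simp [replace_bigram, hx]

-- main invariant: fold from a "safe" state appends A's result (reversed); fold from an
-- unmerged state ending in `a` may merge once with an incoming `b`
lemma rb_fold (a b id : Int) (xs : List Int) :
    (∀ out jm, (jm = true ∨ out.head? ≠ some a) →
      (List.foldl (rbStep a b id) (out, jm) xs).1
        = (replace_bigram xs (a, b) id).reverse ++ out)
    ∧ (∀ out, (List.foldl (rbStep a b id) (a :: out, false) xs).1
        = if xs.head? = some b then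
            (replace_bigram xs.tail (a, b) id).reverse ++ id :: out
          else
            (replace_bigram xs (a, b) id).reverse ++ a :: out) := by
  induction xs with
  | nil =>
      constructor
      · intro out jm _; simp [replace_bigram]
      · intro out; simp [replace_bigram]
  | cons x rest ih =>
      constructor
      · intro out jm hsafe
        have hstep : rbStep a b id (out, jm) x = (x :: out, false) := by
          cases out with
          | nil => simp [rbStep]
          | cons last r =>
              have hcond : ¬ (jm = false ∧ last = a ∧ x = b) := by
                rcases hsafe with h | h
                · simp [h]
                · intro ⟨_, hla, _⟩; exact h (by simp [hla])
              simp [rbStep, hcond]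
        rw [List.foldl_cons, hstep]
        by_cases hx : x = a
        · subst hx
          rw [(ih).2 out]
          cases rest with
          | nil => simp [replace_bigram]
          | cons y r =>
              by_cases hy : y = b
              · subst hy; simp [replace_bigram]
              · simp [replace_bigram, hy]
        · rw [(ih).1 (x :: out) false (Or.inr (by simp [hx]))]
          rw [rbA_cons_ne a b id x rest hx]
          simp
      · intro out
        by_cases hx : x = b
        · have hstep : rbStep a b id (a :: out, false) x = (id :: out, true) := by
            simp [rbStep, hx]
          rw [List.foldl_cons, hstep, (ih).1 (id :: out) true (Or.inl rfl)]
          simp [hx]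
        · have hstep : rbStep a b id (a :: out, false) x = (x :: a :: out, false) := by
            simp [rbStep, hx]
          rw [List.foldl_cons, hstep]
          by_cases hxa : x = a
          · subst hxa
            rw [(ih).2 (x :: out)]
            cases rest with
            | nil => simp [replace_bigram, hx]
            | cons z r =>
                by_cases hz : z = b
                · subst hz
                  simp [replace_bigram, hx]
                · simp [replace_bigram, hx, hz]
          · rw [(ih).1 (x :: a :: out) false (Or.inr (by simp [hxa]))]
            rw [rbA_cons_ne a b id x rest hxa]
            simp [hx]

-- ===== VERDICT (by name: the statement is the Claim_ definition above) =====
theorem replace_bigram_spec : Claim_equal_replace_bigram := by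
  intro token_ids bigram bigram_id _
  unfold Spec_replace_bigram replace_bigram_alt
  obtain ⟨a, b⟩ := bigram
  rw [(rb_fold a b bigram_id token_ids).1 [] false (Or.inr (by simp))]
  simp
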